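-- pv_equiv track=rewrite | github.com/vborra09/CV | part2/omr.py | lin_sp_estimation
-- ===== SOURCE A (Python) =====
-- def lin_sp_estimation(lines):
--
--     if len(lines) < 2:
--         return 10
--     first_four = sorted(lines)[:4]
--     gaps = []
--     for i in range(len(first_four) - 1):
--         gaps.append(first_four[i+1] - first_four[i])
--     if not gaps:
--         return 10
--     return int(sum(gaps)/len(gaps))
-- ===== SOURCE B (Python) =====
-- def lin_sp_estimation(lines):
--     if len(lines) < 2:
--         return 10
--     # one pass keeping the (at most) 4 smallest values in sorted order;
--     # the gaps of a sorted run telescope, so their mean is (max - min) / count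
--     buf = []
--     for x in lines:
--         i = 0
--         while i < len(buf) and buf[i] < x:
--             i += 1
--         buf.insert(i, x)
--         if len(buf) > 4:
--             buf.pop()
--     return (buf[-1] - buf[0]) // (len(buf) - 1)
-- ===== Notes on version B (the rewrite author's own statement) =====
-- stated objective: alternative
-- what changed: replaces sorted(lines)[:4] plus a gap-building loop and their averaged sum by a single pass that keeps only the 4 smallest values in a bounded insertion buffer and returns the telescoped mean (max4 - min4) // (count - 1); asymptotically O(n) vs O(n log n), but the interpreter-level a timing run did not confirm a >=1.5x speed-up, so no speed is claimed
import Mathlib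
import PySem

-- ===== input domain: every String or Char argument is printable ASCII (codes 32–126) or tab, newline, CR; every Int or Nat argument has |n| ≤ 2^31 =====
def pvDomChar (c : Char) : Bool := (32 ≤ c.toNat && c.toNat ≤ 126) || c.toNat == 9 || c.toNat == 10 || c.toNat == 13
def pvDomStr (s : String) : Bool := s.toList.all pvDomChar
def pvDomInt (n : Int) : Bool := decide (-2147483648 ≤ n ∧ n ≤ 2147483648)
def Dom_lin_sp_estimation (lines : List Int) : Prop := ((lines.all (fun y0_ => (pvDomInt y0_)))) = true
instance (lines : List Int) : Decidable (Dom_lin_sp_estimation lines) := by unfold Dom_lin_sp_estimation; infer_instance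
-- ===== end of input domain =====

-- B replaces sort-then-take-4 by a single pass keeping the 4 smallest values and a telescoped gap mean; a different algorithm of similar measured cost (no speed claimed).

-- ===== PORT A =====
-- int(sum(gaps)/len(gaps)): gaps of an ascending run are nonnegative and (on Dom) their sum
-- is < 2^33, so the float quotient truncated toward zero equals floor division; exact here.
def lin_sp_estimation (lines : List Int) : Int :=
  if lines.length < 2 then 10
  else
    let first_four := (PySem.List.sorted lines (fun x => x) false).take 4
    let gaps := (PySem.List.pyRange 0 ((first_four.length : Int) - 1) 1).foldl
      (fun g i => g ++ [(PySem.List.pyGet? first_four (i + 1)).getD 0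
                        - (PySem.List.pyGet? first_four i).getD 0]) []
    if gaps = [] then 10
    else PySem.Int.floordiv (gaps.foldl (· + ·) 0) (gaps.length : Int)

-- ===== PORT B =====
-- the while-loop + insert of Source B: insert x before the first element not below it
def insLess (x : Int) : List Int → List Int
  | [] => [x]
  | h :: t => if h < x then h :: insLess x t else x :: h :: t

def lin_sp_estimation_alt (lines : List Int) : Int :=
  if lines.length < 2 then 10
  else
    let buf := lines.foldl (fun buf x =>
      let b2 := insLess x buf
      if 4 < b2.length then b2.dropLast else b2) []
    PySem.Int.floordiv ((PySem.List.pyGet? buf (-1)).getD 0 - (PySem.List.pyGet? buf 0).getD 0)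
      ((buf.length : Int) - 1)

-- ===== PRECONDITION & SPEC =====
def Spec_lin_sp_estimation (lines : List Int) (out : Int) : Prop := out = lin_sp_estimation_alt lines
instance (lines : List Int) (out : Int) : Decidable (Spec_lin_sp_estimation lines out) := by unfold Spec_lin_sp_estimation; infer_instance

-- ===== CLAIM (what is proved, stated in full; the proofs are below) =====
def Claim_equal_lin_sp_estimation : Prop := ∀ (lines : List Int), Dom_lin_sp_estimation lines → Spec_lin_sp_estimation lines (lin_sp_estimation lines)

-- ===== LEMMAS AND PROOFS =====

theorem insLess_perm (x : Int) (s : List Int) : (insLess x s).Perm (x :: s) := by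
  induction s with
  | nil => simp [insLess]
  | cons h t ih =>
    simp only [insLess]
    split
    · exact ((ih.cons h).trans (List.Perm.swap x h t))
    · exact List.Perm.refl _

theorem insLess_pairwise (x : Int) (s : List Int) (hs : s.Pairwise (· ≤ ·)) :
    (insLess x s).Pairwise (· ≤ ·) := by
  induction s with
  | nil => simp [insLess]
  | cons h t ih =>
    rw [List.pairwise_cons] at hs
    simp only [insLess]
    by_cases hc : h < x
    · rw [if_pos hc, List.pairwise_cons]
      refine ⟨fun y hy => ?_, ih hs.2⟩
      rcases List.mem_cons.mp ((insLess_perm x t).mem_iff.mp hy) with h1 | h2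
      · exact h1 ▸ le_of_lt hc
      · exact hs.1 y h2
    · rw [if_neg hc, List.pairwise_cons, List.pairwise_cons]
      refine ⟨fun y hy => ?_, hs.1, hs.2⟩
      rcases List.mem_cons.mp hy with h1 | h2
      · exact h1 ▸ le_of_not_gt hc
      · exact le_trans (le_of_not_gt hc) (hs.1 y h2)

theorem insLess_length (x : Int) (s : List Int) : (insLess x s).length = s.length + 1 := by
  induction s with
  | nil => rfl
  | cons h t ih => simp only [insLess]; split <;> simp [ih]

theorem take_insLess (n : Nat) (x : Int) (s : List Int) :
    ((insLess x s).take n) = ((insLess x (s.take n)).take n) := by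
  induction s generalizing n with
  | nil => simp
  | cons h t ih =>
    cases n with
    | zero => simp
    | succ m =>
      simp only [List.take_succ_cons, insLess]
      by_cases hc : h < x
      · simp only [if_pos hc, List.take_succ_cons, ih m]
      · simp only [if_neg hc, List.take_succ_cons]
        cases m with
        | zero => simp
        | succ k =>
          rw [List.take_succ_cons, List.take_succ_cons, List.take_take,
            Nat.min_eq_left (Nat.le_succ k)]

def isort (l : List Int) : List Int := l.foldl (fun s x => insLess x s) []

theorem isort_append (l : List Int) (x : Int) : isort (l ++ [x]) = insLess x (isort l) := by
  simp [isort, List.foldl_append]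

theorem isort_perm (l : List Int) : (isort l).Perm l := by
  induction l using List.reverseRecOn with
  | nil => simp [isort]
  | append_singleton l x ih =>
    rw [isort_append]
    exact ((insLess_perm x (isort l)).trans (ih.cons x)).trans
      (List.perm_append_singleton x l).symm

theorem isort_pairwise (l : List Int) : (isort l).Pairwise (· ≤ ·) := by
  induction l using List.reverseRecOn with
  | nil => simp [isort]
  | append_singleton l x ih =>
    rw [isort_append]
    exact insLess_pairwise x (isort l) ih

theorem sorted_eq_isort (l : List Int) :
    PySem.List.sorted l (fun x => x) false = isort l :=
  PySem.List.sorted_id_eq_of_perm_of_pairwise _ _ (isort_perm l) (isort_pairwise l)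

theorem buf_eq_take_isort (l : List Int) :
    l.foldl (fun buf x =>
      let b2 := insLess x buf
      if 4 < b2.length then b2.dropLast else b2) [] = (isort l).take 4 := by
  induction l using List.reverseRecOn with
  | nil => simp [isort]
  | append_singleton l x ih =>
    rw [List.foldl_append, List.foldl_cons, List.foldl_nil, ih, isort_append,
      take_insLess 4 x (isort l)]
    simp only
    by_cases h4 : 4 < (insLess x ((isort l).take 4)).length
    · have hlen : (insLess x ((isort l).take 4)).length = 5 := by
        have h1 := insLess_length x ((isort l).take 4)
        have h2 : ((isort l).take 4).length ≤ 4 := by simp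
        omega
      rw [if_pos h4, List.dropLast_eq_take, hlen]
    · rw [if_neg h4]
      exact (List.take_of_length_le (by
        have := insLess_length x ((isort l).take 4); omega)).symm

-- ===== VERDICT (by name: the statement is the Claim_ definition above) =====
theorem lin_sp_estimation_spec : Claim_equal_lin_sp_estimation := by
  intro lines _
  unfold Spec_lin_sp_estimation lin_sp_estimation lin_sp_estimation_alt
  by_cases h2 : lines.length < 2
  · simp [h2]
  · rw [if_neg h2, if_neg h2, buf_eq_take_isort, ← sorted_eq_isort]
    have hlen : 2 ≤ (PySem.List.sorted lines (fun x => x) false).length := by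
      rw [PySem.List.length_sorted]; omega
    rcases hs : PySem.List.sorted lines (fun x => x) false with _ | ⟨p, _ | ⟨q, rest⟩⟩
    · rw [hs] at hlen; simp at hlen
    · rw [hs] at hlen; simp at hlen
    · rcases rest with _ | ⟨r, _ | ⟨w, rest2⟩⟩
      · -- two elements
        simp [PySem.List.pyRange, PySem.List.pyGet?, PySem.List.pyIdx?, PySem.Int.floordiv,
          List.take_nil, List.range_succ]
      · simp [PySem.List.pyRange, PySem.List.pyGet?, PySem.List.pyIdx?, PySem.Int.floordiv,
          List.range_succ]
      · simp [PySem.List.pyRange, PySem.List.pyGet?, PySem.List.pyIdx?, PySem.Int.floordiv,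
          List.range_succ]
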